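-- pv_equiv track=rewrite | github.com/punisher21maximum/MyDSAVault | 7 Arrays/1 Array Rotations/13_maxHammingDist.py | maxHam
-- ===== SOURCE A (Python) =====
-- def maxHam(arr):
--     '''
--     Ques: max hamming dist is the count of number of
--     ele diff in two arrays at corresponding position.
--
--     Approach:
--     Here note, we have to compare the original arr
--     with each possible rotation (which is n).
--     For "mutiple quick rotations" we use temp arr
--     of size 2N with original arr duplicated twice in
--     it.
--     '''
--
--     arr2 = arr[:] * 2
--
--     maxHam = 0
--     for i in range(len(arr)):
--         startIdx = i  # for current rotation
--         currHam = 0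
--         for j in range(len(arr)):  # traverse both arr
--             if arr[j] != arr2[startIdx + j]:
--                 currHam += 1
--         maxHam = max(currHam, maxHam)
--
--     return maxHam
-- ===== SOURCE B (Python) =====
-- def maxHam(arr):
--     n = len(arr)
--     match = [0] * n
--     for a in range(n):
--         for b in range(n):
--             if arr[a] == arr[b]:
--                 match[(b - a) % n] += 1
--     return max((n - m for m in match), default=0)
-- ===== Notes on version B (the rewrite author's own statement) =====
-- stated objective: alternative
-- what changed: Replaces A's rotation-by-rotation comparison against a doubled array with a single pass over all index pairs that bins equal-value pairs into a per-shift match table, then takes max(n - match[d]) over the table.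
import Mathlib
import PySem

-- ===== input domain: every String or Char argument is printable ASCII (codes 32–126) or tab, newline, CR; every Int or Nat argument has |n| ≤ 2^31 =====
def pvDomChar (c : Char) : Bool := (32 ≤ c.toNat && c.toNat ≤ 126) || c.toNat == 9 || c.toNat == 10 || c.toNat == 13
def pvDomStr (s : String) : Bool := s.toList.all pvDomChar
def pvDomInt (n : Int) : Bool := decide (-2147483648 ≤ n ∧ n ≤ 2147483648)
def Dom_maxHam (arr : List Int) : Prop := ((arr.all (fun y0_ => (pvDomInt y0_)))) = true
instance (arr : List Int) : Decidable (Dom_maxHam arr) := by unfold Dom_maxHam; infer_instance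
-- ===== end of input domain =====

-- B bins equal-value index pairs into a per-shift match table in one double pass, instead of A's per-rotation comparison against a doubled array (alternative decomposition, same asymptotic cost).

-- ===== PORT A =====
-- literal transliteration of A: doubled array, outer loop over rotations, inner mismatch count
-- (indices are always in range, so pyGetD with default 0 is exact here)
def maxHam (arr : List Int) : Int :=
  let arr2 := arr ++ arr
  (PySem.List.pyRange 0 (arr.length : Int) 1).foldl (fun maxH i =>
    let startIdx := i
    let currHam := (PySem.List.pyRange 0 (arr.length : Int) 1).foldl
      (fun c j => if PySem.List.pyGetD arr j 0 ≠ PySem.List.pyGetD arr2 (startIdx + j) 0 then c + 1 else c) 0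
    max currHam maxH) 0

-- ===== PORT B =====
-- literal transliteration of Source B: match table of length n, double loop binning equal pairs
-- by shift (b-a) % n (Python floor mod = PySem.Int.mod; the index is always in range,
-- so the read-then-write of `match[k] += 1` is pyGetD/pySetD), then max with default 0
def maxHam_alt (arr : List Int) : Int :=
  let n : Int := (arr.length : Int)
  let m0 : List Int := List.replicate arr.length 0
  let mt := (PySem.List.pyRange 0 n 1).foldl (fun m a =>
    (PySem.List.pyRange 0 n 1).foldl (fun m b =>
      if PySem.List.pyGetD arr a 0 = PySem.List.pyGetD arr b 0 then
        PySem.List.pySetD m (PySem.Int.mod (b - a) n)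
          (PySem.List.pyGetD m (PySem.Int.mod (b - a) n) 0 + 1)
      else m) m) m0
  (PySem.List.max? (mt.map (fun m => n - m)) (fun x => x)).getD 0

-- ===== PRECONDITION & SPEC =====
def Spec_maxHam (arr : List Int) (out : Int) : Prop := out = maxHam_alt arr
instance (arr : List Int) (out : Int) : Decidable (Spec_maxHam arr out) := by unfold Spec_maxHam; infer_instance

-- ===== CLAIM (what is proved, stated in full; the proofs are below) =====
def Claim_equal_maxHam : Prop := ∀ (arr : List Int), Dom_maxHam arr → Spec_maxHam arr (maxHam arr)

-- ===== LEMMAS AND PROOFS =====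

-- number of positions that MATCH under rotation by d
def matchesCnt (arr : List Int) (d : Nat) : Nat :=
  (List.range arr.length).countP (fun j => decide (arr.getD j 0 = arr.getD ((j + d) % arr.length) 0))

-- a conditional "+1" fold IS a countP
theorem foldl_count_int {a : Type} (p : a -> Prop) [DecidablePred p] (l : List a) (c : Int) :
    l.foldl (fun c x => if p x then c + 1 else c) c
      = c + ((l.countP (fun x => decide (p x)) : Nat) : Int) := by
  induction l generalizing c with
  | nil => simp
  | cons x t ih =>
    simp only [List.foldl_cons, List.countP_cons]
    by_cases hx : p x <;> simp [hx, ih] <;> push_cast <;> ring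

theorem getD_append_mod (arr : List Int) (k : Nat) (hn : 0 < arr.length)
    (hk : k < 2 * arr.length) :
    (arr ++ arr).getD k 0 = arr.getD (k % arr.length) 0 := by
  rcases lt_or_ge k arr.length with h | h
  · rw [List.getD_eq_getElem?_getD, List.getD_eq_getElem?_getD,
      List.getElem?_append_left h, Nat.mod_eq_of_lt h]
  · rw [List.getD_eq_getElem?_getD, List.getD_eq_getElem?_getD,
      List.getElem?_append_right h]
    have : k % arr.length = k - arr.length := by
      rw [Nat.mod_eq_sub_mod h, Nat.mod_eq_of_lt (by omega)]
    rw [this]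

theorem maxHam_char (arr : List Int) :
    maxHam arr = (List.range arr.length).foldl
      (fun acc i => max ((arr.length : Int) - (matchesCnt arr i : Int)) acc) 0 := by
  unfold maxHam
  simp only [PySem.List.pyRange_zero_nat, List.foldl_map]
  apply PySem.List.foldl_congr_mem
  intro acc i hi
  have hi' : i < arr.length := List.mem_range.mp hi
  have hn : 0 < arr.length := by omega
  congr 1
  -- inner loop = number of mismatches = n - matchesCnt
  have hstep : ∀ (c : Int) (j : Nat),
      (if PySem.List.pyGetD arr (↑j) 0 ≠ PySem.List.pyGetD (arr ++ arr) (↑i + ↑j) 0 then c + 1 else c)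
        = (if ¬ (arr.getD j 0 = (arr ++ arr).getD (i + j) 0) then c + 1 else c) := by
    intro c j
    have : ((i : Int) + (j : Int)) = ((i + j : Nat) : Int) := by push_cast; ring
    rw [this, PySem.List.pyGetD_natCast, PySem.List.pyGetD_natCast]
  rw [PySem.List.foldl_congr_mem _ _ _ _ (fun c j _ => hstep c j),
    foldl_count_int (fun j : Nat => ¬ (arr.getD j 0 = (arr ++ arr).getD (i + j) 0))]
  have hcongr : (List.range arr.length).countP
        (fun j => decide (¬ (arr.getD j 0 = (arr ++ arr).getD (i + j) 0)))
      = (List.range arr.length).countP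
        (fun j => !(decide (arr.getD j 0 = arr.getD ((j + i) % arr.length) 0))) := by
    apply List.countP_congr
    intro j hj
    have hj' : j < arr.length := List.mem_range.mp hj
    rw [getD_append_mod arr (i + j) hn (by omega), Nat.add_comm i j]
    simp
  rw [hcongr]
  have hsum : (List.range arr.length).countP
        (fun j => !(decide (arr.getD j 0 = arr.getD ((j + i) % arr.length) 0)))
      + matchesCnt arr i = arr.length := by
    unfold matchesCnt
    have hsplit := List.length_eq_countP_add_countP
      (fun j : Nat => decide (arr.getD j 0 = arr.getD ((j + i) % arr.length) 0))
      (l := List.range arr.length)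
    rw [List.length_range] at hsplit
    have hsame : (List.range arr.length).countP
          (fun j => decide (¬ (decide (arr.getD j 0 = arr.getD ((j + i) % arr.length) 0)) = true))
        = (List.range arr.length).countP
          (fun j => !(decide (arr.getD j 0 = arr.getD ((j + i) % arr.length) 0))) := by
      apply List.countP_congr; intro x _; simp
    omega
  omega

-- B-side: the pair-binning step, named for the proofs (definitionally the lambda in maxHam_alt)
def bstep (arr : List Int) (a : Int) (m : List Int) (b : Int) : List Int :=
  if PySem.List.pyGetD arr a 0 = PySem.List.pyGetD arr b 0 then
    PySem.List.pySetD m (PySem.Int.mod (b - a) (arr.length : Int))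
      (PySem.List.pyGetD m (PySem.Int.mod (b - a) (arr.length : Int)) 0 + 1)
  else m

theorem bstep_apply (arr : List Int) (a : Int) (m : List Int) (b : Int) :
    bstep arr a m b
      = if PySem.List.pyGetD arr a 0 = PySem.List.pyGetD arr b 0 then
          PySem.List.pySetD m (PySem.Int.mod (b - a) (arr.length : Int))
            (PySem.List.pyGetD m (PySem.Int.mod (b - a) (arr.length : Int)) 0 + 1)
        else m := rfl

theorem bstep_length (arr : List Int) (a m b) : (bstep arr a m b).length = m.length := by
  unfold bstep; split <;> simp [PySem.List.length_pySetD]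

theorem bfold_length (arr : List Int) (a : Int) (l : List Int) (m : List Int) :
    (l.foldl (bstep arr a) m).length = m.length := by
  induction l generalizing m with
  | nil => rfl
  | cons b t ih => rw [List.foldl_cons, ih, bstep_length]

theorem emod_sub_left (x y n : Int) : (x % n - y) % n = (x - y) % n := by
  conv_rhs => rw [Int.sub_emod]
  conv_lhs => rw [Int.sub_emod, Int.emod_emod_of_dvd x dvd_rfl]

-- folding bstep over shifts that never bin into slot d leaves entry d unchanged
theorem bstep_pres (arr : List Int) (a : Nat) (d : Nat) (hd : d < arr.length)
    (l : List Int)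
    (hl : ∀ b ∈ l, 0 ≤ b ∧ b < (arr.length : Int) ∧ b ≠ (((a + d) % arr.length : Nat) : Int)) :
    ∀ m : List Int, m.length = arr.length →
      (l.foldl (bstep arr (a : Int)) m).getD d 0 = m.getD d 0 := by
  induction l with
  | nil => intro m _; rfl
  | cons b t ih =>
    intro m hm
    obtain ⟨hb0, hb1, hbne⟩ := hl b (List.mem_cons_self ..)
    have hrec := ih (fun x hx => hl x (List.mem_cons_of_mem _ hx))
    rw [List.foldl_cons, hrec _ (by rw [bstep_length]; exact hm)]
    unfold bstep
    split
    · have hn : (0 : Int) < (arr.length : Int) := lt_of_le_of_lt hb0 hb1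
      rw [PySem.Int.mod_eq_emod_of_pos hn, PySem.List.pySetD_of_nonneg _ _
        (Int.emod_nonneg _ (by omega))]
      have hkd : ((b - (a : Int)) % (arr.length : Int)).toNat ≠ d := by
        intro hcon
        apply hbne
        have hk0 : 0 ≤ (b - (a : Int)) % (arr.length : Int) := Int.emod_nonneg _ (by omega)
        have hkd' : (b - (a : Int)) % (arr.length : Int) = (d : Int) := by omega
        have : b % (arr.length : Int) = b := Int.emod_eq_of_lt hb0 hb1
        calc b = b % (arr.length : Int) := this.symm
          _ = (b - (a : Int) + (a : Int)) % (arr.length : Int) := by ring_nf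
          _ = ((b - (a : Int)) % (arr.length : Int) + (a : Int)) % (arr.length : Int) := by
                rw [Int.emod_add_emod]
          _ = ((d : Int) + (a : Int)) % (arr.length : Int) := by rw [hkd']
          _ = (((a + d) % arr.length : Nat) : Int) := by push_cast; ring_nf
      rw [List.getD_eq_getElem?_getD, List.getD_eq_getElem?_getD,
        List.getElem?_set_ne hkd]
    · rfl

-- one inner pass over b adds exactly the match indicator for shift d
theorem inner_entry (arr : List Int) (a : Nat) (ha : a < arr.length)
    (m : List Int) (hm : m.length = arr.length) (d : Nat) (hd : d < arr.length) :
    ((PySem.List.pyRange 0 (arr.length : Int) 1).foldl (bstep arr (a : Int)) m).getD d 0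
      = m.getD d 0 +
        (if arr.getD a 0 = arr.getD ((a + d) % arr.length) 0 then 1 else 0) := by
  have hn : 0 < arr.length := by omega
  have hb0 : (a + d) % arr.length < arr.length := Nat.mod_lt _ hn
  have hsplit : PySem.List.pyRange 0 (arr.length : Int) 1
      = PySem.List.pyRange 0 (((a + d) % arr.length : Nat) : Int) 1
        ++ ((((a + d) % arr.length : Nat) : Int)
            :: PySem.List.pyRange ((((a + d) % arr.length : Nat) : Int) + 1) (arr.length : Int) 1) := by
    rw [PySem.List.pyRange_one_append 0 (((a + d) % arr.length : Nat) : Int) (arr.length : Int)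
        (by positivity) (by exact_mod_cast hb0.le),
      PySem.List.pyRange_one_cons (a := (((a + d) % arr.length : Nat) : Int))
        (b := (arr.length : Int)) (by exact_mod_cast hb0)]
  rw [hsplit, List.foldl_append, List.foldl_cons]
  have hpre : (List.foldl (bstep arr (a : Int)) m
      (PySem.List.pyRange 0 (((a + d) % arr.length : Nat) : Int) 1)).getD d 0 = m.getD d 0 := by
    apply bstep_pres arr a d hd _ _ m hm
    intro b hb
    rw [PySem.List.mem_pyRange_one] at hb
    refine ⟨hb.1, ?_, by omega⟩
    have : (b : Int) < (((a + d) % arr.length : Nat) : Int) := hb.2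
    have : (((a + d) % arr.length : Nat) : Int) ≤ (arr.length : Int) := by exact_mod_cast hb0.le
    omega
  have hprelen : (List.foldl (bstep arr (a : Int)) m
      (PySem.List.pyRange 0 (((a + d) % arr.length : Nat) : Int) 1)).length = arr.length := by
    rw [bfold_length]; exact hm
  have hmidlen : (bstep arr (a : Int) (List.foldl (bstep arr (a : Int)) m
      (PySem.List.pyRange 0 (((a + d) % arr.length : Nat) : Int) 1)) (((a + d) % arr.length : Nat) : Int)).length = arr.length := by
    rw [bstep_length]; exact hprelen
  rw [bstep_pres arr a d hd _ ?post _ hmidlen]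
  case post =>
    intro b hb
    rw [PySem.List.mem_pyRange_one] at hb
    exact ⟨by omega, hb.2, by omega⟩
  -- the middle step: shift (b0 - a) % n is exactly d
  have hmod : PySem.Int.mod ((((a + d) % arr.length : Nat) : Int) - (a : Int)) (arr.length : Int) = (d : Int) := by
    rw [PySem.Int.mod_eq_emod_of_pos (by exact_mod_cast hn)]
    have hcast : ((((a + d) % arr.length : Nat)) : Int) = ((a : Int) + (d : Int)) % (arr.length : Int) := by
      push_cast; ring_nf
    rw [hcast, emod_sub_left]
    have : (a : Int) + (d : Int) - (a : Int) = (d : Int) := by ring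
    rw [this, Int.emod_eq_of_lt (by positivity) (by exact_mod_cast hd)]
  rw [bstep_apply, hmod]
  rw [PySem.List.pyGetD_natCast, PySem.List.pyGetD_natCast, PySem.List.pyGetD_natCast,
    PySem.List.pySetD_natCast]
  split
  · conv_lhs => rw [List.getD_eq_getElem?_getD]
    rw [List.getElem?_set_self (by omega), hpre]
    rfl
  · rw [hpre]; ring

-- the whole outer pass: entry d of the table counts the matching positions processed
theorem outer_entry (arr : List Int) (d : Nat) (hd : d < arr.length)
    (l : List Int) (hl : ∀ x ∈ l, 0 ≤ x ∧ x < (arr.length : Int)) :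
    ∀ m : List Int, m.length = arr.length →
      ((l.foldl (fun m a => (PySem.List.pyRange 0 (arr.length : Int) 1).foldl (bstep arr a) m) m).getD d 0
        = m.getD d 0 + ((l.countP (fun a =>
            decide (arr.getD a.toNat 0 = arr.getD ((a.toNat + d) % arr.length) 0)) : Nat) : Int)) := by
  induction l with
  | nil => intro m _; simp
  | cons a t ih =>
    intro m hm
    obtain ⟨ha0, ha1⟩ := hl a (List.mem_cons_self ..)
    have haeq : a = ((a.toNat : Nat) : Int) := (Int.toNat_of_nonneg ha0).symm
    have hat : a.toNat < arr.length := by omega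
    rw [List.foldl_cons, ih (fun x hx => hl x (List.mem_cons_of_mem _ hx)) _
      (by rw [bfold_length]; exact hm)]
    conv_lhs => rw [haeq]
    rw [inner_entry arr a.toNat hat m hm d hd, List.countP_cons]
    by_cases hc : arr.getD a.toNat 0 = arr.getD ((a.toNat + d) % arr.length) 0 <;>
      simp only [hc, decide_true, decide_false, if_true, if_false] <;> push_cast <;> ring

theorem mt_eq (arr : List Int) :
    ((PySem.List.pyRange 0 (arr.length : Int) 1).foldl
      (fun m a => (PySem.List.pyRange 0 (arr.length : Int) 1).foldl (bstep arr a) m)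
      (List.replicate arr.length 0))
    = (List.range arr.length).map (fun d => ((matchesCnt arr d : Nat) : Int)) := by
  have hlen : ((PySem.List.pyRange 0 (arr.length : Int) 1).foldl
      (fun m a => (PySem.List.pyRange 0 (arr.length : Int) 1).foldl (bstep arr a) m)
      (List.replicate arr.length 0)).length = arr.length := by
    have : ∀ (l : List Int) (m : List Int),
        (l.foldl (fun m a => (PySem.List.pyRange 0 (arr.length : Int) 1).foldl (bstep arr a) m) m).length
          = m.length := by
      intro l
      induction l with
      | nil => intro m; rfl
      | cons a t ih => intro m; rw [List.foldl_cons, ih, bfold_length]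
    rw [this, List.length_replicate]
  apply List.ext_getElem (by simp [hlen])
  intro d h1 h2
  have hd : d < arr.length := by omega
  have hentry := outer_entry arr d hd (PySem.List.pyRange 0 (arr.length : Int) 1)
    (fun x hx => by rw [PySem.List.mem_pyRange_one] at hx; exact ⟨hx.1, hx.2⟩)
    (List.replicate arr.length 0) (List.length_replicate ..)
  have hrepl : (List.replicate arr.length (0 : Int)).getD d 0 = 0 := by
    rw [List.getD_eq_getElem?_getD, List.getElem?_replicate]
    split <;> rfl
  rw [hrepl] at hentry
  have hcount : (PySem.List.pyRange 0 (arr.length : Int) 1).countP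
        (fun a => decide (arr.getD a.toNat 0 = arr.getD ((a.toNat + d) % arr.length) 0))
      = matchesCnt arr d := by
    rw [PySem.List.pyRange_zero_nat, List.countP_map]
    unfold matchesCnt
    apply List.countP_congr
    intro j _
    simp
  rw [hcount] at hentry
  have hgd : ((PySem.List.pyRange 0 (arr.length : Int) 1).foldl
      (fun m a => (PySem.List.pyRange 0 (arr.length : Int) 1).foldl (bstep arr a) m)
      (List.replicate arr.length 0)).getD d 0
      = ((PySem.List.pyRange 0 (arr.length : Int) 1).foldl
      (fun m a => (PySem.List.pyRange 0 (arr.length : Int) 1).foldl (bstep arr a) m)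
      (List.replicate arr.length 0))[d] := by
    rw [List.getD_eq_getElem?_getD, List.getElem?_eq_getElem h1]
    rfl
  rw [hgd] at hentry
  rw [hentry]
  simp

theorem maxHam_alt_char (arr : List Int) :
    maxHam_alt arr = (PySem.List.max?
      ((List.range arr.length).map (fun d => (arr.length : Int) - (matchesCnt arr d : Int)))
      (fun x => x)).getD 0 := by
  have e : maxHam_alt arr = (PySem.List.max?
      (((PySem.List.pyRange 0 (arr.length : Int) 1).foldl
        (fun m a => (PySem.List.pyRange 0 (arr.length : Int) 1).foldl (bstep arr a) m)
        (List.replicate arr.length 0)).map (fun m => (arr.length : Int) - m))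
      (fun x => x)).getD 0 := rfl
  rw [e, mt_eq, List.map_map]
  rfl

theorem matchesCnt_zero (arr : List Int) : matchesCnt arr 0 = arr.length := by
  unfold matchesCnt
  have hall : ∀ j ∈ List.range arr.length,
      (fun j => decide (arr.getD j 0 = arr.getD ((j + 0) % arr.length) 0)) j = true := by
    intro j hj
    have : j < arr.length := List.mem_range.mp hj
    simp [Nat.mod_eq_of_lt, this]
  rw [List.countP_eq_length.mpr hall, List.length_range]

-- ===== VERDICT (by name: the statement is the Claim_ definition above) =====
theorem maxHam_spec : Claim_equal_maxHam := by
  intro arr _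
  unfold Spec_maxHam
  rw [maxHam_char, maxHam_alt_char]
  rcases hn : arr.length with _ | m
  · simp only [List.range_zero, List.map_nil, List.foldl_nil]
    rw [(PySem.List.max?_eq_none_iff _ _).mpr rfl]
    rfl
  · have hz : ((m + 1 : Nat) : Int) - ((matchesCnt arr 0 : Nat) : Int) = 0 := by
      rw [matchesCnt_zero, hn]; ring
    have hflip : (fun (acc : Int) (i : Nat) => max (((m + 1 : Nat) : Int) - ((matchesCnt arr i : Nat) : Int)) acc)
        = fun (acc : Int) (i : Nat) => max acc (((m + 1 : Nat) : Int) - ((matchesCnt arr i : Nat) : Int)) := by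
      funext acc i; exact max_comm _ _
    rw [List.range_succ_eq_map]
    simp only [List.map_cons]
    rw [PySem.List.max?_id_cons, Option.getD_some, List.foldl_map, hflip]
    simp only [List.foldl_cons]
    rw [hz]
    simp
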